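-- pv_equiv track=rewrite | github.com/GeoMinesGold/paperctl | main.py | parse_month
-- ===== SOURCE A (Python) =====
-- def parse_month(month, human=True):
--     # Convert month abbreviations or numbers into session format and vice versa
--     month = str(month).lower()
--
--     if month.isdigit():
--         month = month.zfill(2)  # Ensure 2-digit format for numbers
--
--     # Define the mapping
--     month_map = {
--         'January': ['j', '01', 'jan', 'january'],
--         'Feb-March': ['m', '02', '03', 'feb', 'february', 'mar', 'march'],
--         'May-June': ['s', '04', '05', '06', '07', '08', 'apr', 'april', 'may', 'jun', 'june', 'aug', 'august', 'summer'],
--         'Oct-Nov': ['w', '09', '10', '11', '12', 'sept', 'september', 'oct', 'october', 'nov', 'dec', 'december', 'winter'],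
--         'Specimen': ['y', 'sp', 'spec', 'specimen']
--     }
--
--     # Reverse the mapping for easy lookup in both directions
--     abbreviation_map = {abbr: full for full, abbrs in month_map.items() for abbr in abbrs}
--
--     if human:
--         # Check if the input is an abbreviation
--         if month in abbreviation_map:
--             return abbreviation_map[month]  # Return the full name if abbreviation matches
--         # If it's not an abbreviation, check if it's a full name
--         for full_name in month_map:
--             if month == full_name.lower():
--                 return full_name  # Return full name if matches
--         return None  # Return None if no match is found
--     else:
--         for full_name, abbrs in month_map.items():
--             if month == full_name.lower() or month in abbrs:  # If it's a full name
--                 return abbrs[0]  # Return the first abbreviation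
--     return None
-- ===== SOURCE B (Python) =====
-- # B classifies numeric input by arithmetic range (no numeric table keys at all)
-- # and word input by a group-index search over per-group word sets, then renders
-- # the answer from two parallel tuples indexed by the group number.
--
-- _FULL = ('January', 'Feb-March', 'May-June', 'Oct-Nov', 'Specimen')
-- _ABBR = ('j', 'm', 's', 'w', 'y')
-- _WORDS = (
--     frozenset(('j', 'jan', 'january')),
--     frozenset(('m', 'feb', 'february', 'mar', 'march', 'feb-march')),
--     frozenset(('s', 'apr', 'april', 'may', 'jun', 'june', 'aug', 'august',
--                'summer', 'may-june')),
--     frozenset(('w', 'sept', 'september', 'oct', 'october', 'nov', 'dec',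
--                'december', 'winter', 'oct-nov')),
--     frozenset(('y', 'sp', 'spec', 'specimen')),
-- )
--
--
-- def parse_month(month, human=True):
--     m = str(month).lower()
--     if m.isdigit():
--         n = int(m) if len(m) <= 2 else 0
--         if n == 1:
--             g = 0
--         elif 2 <= n <= 3:
--             g = 1
--         elif 4 <= n <= 8:
--             g = 2
--         elif 9 <= n <= 12:
--             g = 3
--         else:
--             return None
--     else:
--         for i, words in enumerate(_WORDS):
--             if m in words:
--                 g = i
--                 break
--         else:
--             return None
--     return _FULL[g] if human else _ABBR[g]
-- ===== Notes on version B (the rewrite author's own statement) =====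
-- stated objective: alternative
-- what changed: A rebuilds a reverse dictionary and linearly scans the group table (in both directions) per call; B has no numeric table at all - it classifies digit input by arithmetic range tests on its integer value (1, 2-3, 4-8, 9-12), finds a word's group index in per-group word sets, and renders the answer from two parallel tuples indexed by that group number.
import Mathlib
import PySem

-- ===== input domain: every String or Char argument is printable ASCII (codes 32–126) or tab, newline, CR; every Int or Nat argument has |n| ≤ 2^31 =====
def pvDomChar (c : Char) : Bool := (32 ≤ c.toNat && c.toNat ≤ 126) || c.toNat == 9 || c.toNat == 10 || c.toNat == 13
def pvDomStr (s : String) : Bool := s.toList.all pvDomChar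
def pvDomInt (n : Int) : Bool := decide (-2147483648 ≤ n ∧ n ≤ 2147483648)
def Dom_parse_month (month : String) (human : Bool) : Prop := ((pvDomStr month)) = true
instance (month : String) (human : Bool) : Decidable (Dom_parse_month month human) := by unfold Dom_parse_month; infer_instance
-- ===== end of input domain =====

-- B drops A's table of numeric keys and reverse-dict-plus-scan entirely: it classifies a
-- numeric input by arithmetic range tests on its integer value, and a word input by a
-- group-index search over per-group word sets, then renders from two parallel lists
-- indexed by the group number; equal return value on every input.

-- ===== PORT A =====
-- month_map (constant data A builds on every call)
def pvMonthMap : List (String × List String) :=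
  [("January", ["j", "01", "jan", "january"]),
   ("Feb-March", ["m", "02", "03", "feb", "february", "mar", "march"]),
   ("May-June", ["s", "04", "05", "06", "07", "08", "apr", "april", "may", "jun", "june", "aug", "august", "summer"]),
   ("Oct-Nov", ["w", "09", "10", "11", "12", "sept", "september", "oct", "october", "nov", "dec", "december", "winter"]),
   ("Specimen", ["y", "sp", "spec", "specimen"])]

-- abbreviation_map = {abbr: full for full, abbrs in month_map.items() for abbr in abbrs}
def pvAbbrevMap : PySem.Dict String String :=
  pvMonthMap.foldl (fun d p => p.2.foldl (fun d abbr => d.insert abbr p.1) d) PySem.Dict.empty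

def parse_month (month : String) (human : Bool) : Option String :=
  let m0 := PySem.Str.lower month                                   -- month = str(month).lower()
  let m := if PySem.Str.strIsdigit m0 then PySem.Str.zfill m0 2 else m0   -- zfill(2) if digits
  if human then
    if pvAbbrevMap.contains m then
      pvAbbrevMap.get? m        -- return abbreviation_map[month] (key present, so some _)
    else
      -- for full_name in month_map: if month == full_name.lower(): return full_name; return None
      (pvMonthMap.map Prod.fst).find? (fun full => m == PySem.Str.lower full)
  else
    -- for full_name, abbrs in month_map.items(): if month == full_name.lower() or month in abbrs: return abbrs[0]
    match pvMonthMap.find? (fun p => m == PySem.Str.lower p.1 || p.2.contains m) with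
    | some p => PySem.List.pyGet? p.2 0   -- abbrs[0]; every abbrs list here is nonempty, so exact
    | none => none                        -- return None

-- ===== PORT B =====
-- Source B's module constants: parallel group tables and the per-group word sets
def pvFull : List String := ["January", "Feb-March", "May-June", "Oct-Nov", "Specimen"]
def pvAbbr0 : List String := ["j", "m", "s", "w", "y"]
def pvWordSets : List (PySem.Set String) :=
  [PySem.Set.ofList ["j", "jan", "january"],
   PySem.Set.ofList ["m", "feb", "february", "mar", "march", "feb-march"],
   PySem.Set.ofList ["s", "apr", "april", "may", "jun", "june", "aug", "august", "summer", "may-june"],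
   PySem.Set.ofList ["w", "sept", "september", "oct", "october", "nov", "dec", "december", "winter", "oct-nov"],
   PySem.Set.ofList ["y", "sp", "spec", "specimen"]]

def parse_month_alt (month : String) (human : Bool) : Option String :=
  let m := PySem.Str.lower month                                    -- m = str(month).lower()
  let g? : Option Int :=
    if PySem.Str.strIsdigit m then
      -- n = int(m) if len(m) <= 2 else 0  (int() is exact here: an all-digit ASCII string never raises)
      let n : Int := if PySem.Str.len m ≤ 2 then (PySem.Int.ofStr? m).getD 0 else 0
      if n == 1 then some 0
      else if 2 ≤ n ∧ n ≤ 3 then some 1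
      else if 4 ≤ n ∧ n ≤ 8 then some 2
      else if 9 ≤ n ∧ n ≤ 12 then some 3
      else none                                                     -- return None
    else
      -- for i, words in enumerate(_WORDS): if m in words: g = i; break / else: return None
      (pvWordSets.findIdx? (fun ws => ws.contains m)).map (fun i => (i : Int))
  match g? with
  | some g => if human then PySem.List.pyGet? pvFull g else PySem.List.pyGet? pvAbbr0 g  -- _FULL[g] / _ABBR[g]
  | none => none

-- ===== PRECONDITION & SPEC =====
def Spec_parse_month (month : String) (human : Bool) (out : Option String) : Prop := out = parse_month_alt month human
instance (month : String) (human : Bool) (out : Option String) : Decidable (Spec_parse_month month human out) := by unfold Spec_parse_month; infer_instance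

-- ===== CLAIM (what is proved, stated in full; the proofs are below) =====
def Claim_equal_parse_month : Prop := ∀ (month : String) (human : Bool), Dom_parse_month month human → Spec_parse_month month human (parse_month month human)

-- ===== LEMMAS AND PROOFS =====

-- every key A's tables can hit (all abbreviations plus the lowercased session names)
def pvKeys : List String :=
  ["j", "01", "jan", "january", "m", "02", "03", "feb", "february", "mar", "march", "feb-march",
   "s", "04", "05", "06", "07", "08", "apr", "april", "may", "jun", "june", "aug", "august",
   "summer", "may-june", "w", "09", "10", "11", "12", "sept", "september", "oct", "october",
   "nov", "dec", "december", "winter", "oct-nov", "y", "sp", "spec", "specimen"]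

set_option maxRecDepth 8192 in
lemma pvAbbrev_sub : pvAbbrevMap.keys ⊆ pvKeys := by decide

set_option maxRecDepth 8192 in
lemma pvWordSub : ∀ ws ∈ pvWordSets, ∀ x ∈ ws, x ∈ pvKeys := by decide

-- an ASCII digit is one of the ten digit characters
lemma pvDigitMem (c : Char) (h : PySem.Chars.isdigit c = true) :
    c ∈ ['0', '1', '2', '3', '4', '5', '6', '7', '8', '9'] := by
  simp only [PySem.Chars.isdigit, Bool.and_eq_true, decide_eq_true_eq, Char.le_def,
    UInt32.le_iff_toNat_le] at h
  obtain ⟨h1, h2⟩ := h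
  have hc : Char.ofNat c.toNat = c := Char.ofNat_toNat c
  have h1' : 48 ≤ c.toNat := h1
  have h2' : c.toNat ≤ 57 := h2
  interval_cases hn : c.toNat <;> rw [← hc] <;> decide

-- A's lookup core returns None on any string that is not one of its keys
set_option maxRecDepth 8192 in
lemma pvA_none (m : String) (hm : m ∉ pvKeys) (h : Bool) :
    (if h then
       (if pvAbbrevMap.contains m then pvAbbrevMap.get? m
        else (pvMonthMap.map Prod.fst).find? (fun full => m == PySem.Str.lower full))
     else
       match pvMonthMap.find? (fun p => m == PySem.Str.lower p.1 || p.2.contains m) with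
       | some p => PySem.List.pyGet? p.2 0
       | none => none) = none := by
  have hc : pvAbbrevMap.contains m = false := by
    rw [PySem.Dict.contains_eq_decide_mem_keys, decide_eq_false_iff_not]
    exact fun h' => hm (pvAbbrev_sub h')
  have hf1 : (pvMonthMap.map Prod.fst).find? (fun full => m == PySem.Str.lower full) = none := by
    rw [List.find?_eq_none]
    intro x hx b
    fin_cases hx <;> exact hm (by rw [eq_of_beq b]; decide)
  have hf2 : pvMonthMap.find? (fun p => m == PySem.Str.lower p.1 || decide (m ∈ p.2)) = none := by
    rw [List.find?_eq_none]
    intro x hx b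
    have : m ∈ pvKeys := by
      fin_cases hx <;>
      · simp only [Bool.or_eq_true, beq_iff_eq, decide_eq_true_eq] at b
        rcases b with rfl | hmem
        · decide
        · exact (show _ ⊆ pvKeys by decide) hmem
    exact hm this
  cases h
  · simp only [if_neg Bool.false_ne_true, List.contains_eq_mem, hf2]
  · simp [hc, hf1]

-- B's group search finds nothing on a string outside A's key set
lemma pvB_nofind (m : String) (hm : m ∉ pvKeys) :
    pvWordSets.findIdx? (fun ws => ws.contains m) = none := by
  rw [List.findIdx?_eq_none_iff]
  intro ws hws
  cases hcon : ws.contains m with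
  | false => rfl
  | true => exact absurd (pvWordSub ws hws m (List.mem_of_elem_eq_true hcon)) hm

-- the two cores agree on every (already lowercased) string
set_option maxRecDepth 8192 in
set_option maxHeartbeats 2000000 in
lemma pvCore_eq (m : String) (h : Bool) :
    (if h then
       (if pvAbbrevMap.contains (if PySem.Str.strIsdigit m then PySem.Str.zfill m 2 else m) then
          pvAbbrevMap.get? (if PySem.Str.strIsdigit m then PySem.Str.zfill m 2 else m)
        else
          (pvMonthMap.map Prod.fst).find?
            (fun full => (if PySem.Str.strIsdigit m then PySem.Str.zfill m 2 else m) == PySem.Str.lower full))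
     else
       match pvMonthMap.find?
           (fun p => (if PySem.Str.strIsdigit m then PySem.Str.zfill m 2 else m) == PySem.Str.lower p.1
             || p.2.contains (if PySem.Str.strIsdigit m then PySem.Str.zfill m 2 else m)) with
       | some p => PySem.List.pyGet? p.2 0
       | none => none)
    =
    (match
        (if PySem.Str.strIsdigit m then
          let n : Int := if PySem.Str.len m ≤ 2 then (PySem.Int.ofStr? m).getD 0 else 0
          if n == 1 then some 0
          else if 2 ≤ n ∧ n ≤ 3 then some 1
          else if 4 ≤ n ∧ n ≤ 8 then some 2
          else if 9 ≤ n ∧ n ≤ 12 then some 3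
          else none
        else
          (pvWordSets.findIdx? (fun ws => ws.contains m)).map (fun i => (i : Int))) with
     | some g => if h then PySem.List.pyGet? pvFull g else PySem.List.pyGet? pvAbbr0 g
     | none => none) := by
  by_cases hd : PySem.Str.strIsdigit m = true
  · -- all-digit input
    rcases hL : m.toList with _ | ⟨c, _ | ⟨d, _ | ⟨e, rest⟩⟩⟩
    · -- empty string: isdigit is false, contradiction
      simp [PySem.Str.strIsdigit, PySem.Chars.strIsdigit, hL] at hd
    · -- one digit
      have hm : m = String.ofList [c] := by
        conv_lhs => rw [← String.ofList_toList (s := m), hL]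
      subst hm
      have hcd : PySem.Chars.isdigit c = true := by
        simpa [PySem.Str.strIsdigit, PySem.Chars.strIsdigit] using hd
      have hcm := pvDigitMem c hcd
      fin_cases hcm <;> cases h <;> rfl
    · -- two digits
      have hm : m = String.ofList [c, d] := by
        conv_lhs => rw [← String.ofList_toList (s := m), hL]
      subst hm
      have hall : PySem.Chars.isdigit c = true ∧ PySem.Chars.isdigit d = true := by
        simpa [PySem.Str.strIsdigit, PySem.Chars.strIsdigit] using hd
      have hcm := pvDigitMem c hall.1
      have hdm := pvDigitMem d hall.2
      fin_cases hcm <;> fin_cases hdm <;> cases h <;> rfl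
    · -- three or more digits: both sides are none
      have hlen3 : 3 ≤ m.toList.length := by rw [hL]; simp
      have h2 : (2 : Int) ≤ m.toList.length := by exact_mod_cast Nat.le_trans (by norm_num) hlen3
      have hz : PySem.Str.zfill m 2 = m := by
        rw [PySem.Str.zfill, PySem.Chars.zfill.eq_def, if_pos h2, String.ofList_toList]
      have hnk : m ∉ pvKeys := by
        intro hmem
        fin_cases hmem <;> first
          | exact absurd hd (by decide)
          | exact absurd hlen3 (by decide)
      have hnlen : ¬ (PySem.Str.len m ≤ 2) := by
        simp only [PySem.Str.len]
        omega
      rw [if_pos hd, hz, if_neg hnlen, if_pos hd]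
      refine (pvA_none m hnk h).trans ?_
      rfl
  · -- not a digit string
    rw [if_neg hd]
    by_cases hw : m ∈ pvKeys
    · fin_cases hw <;> first
        | exact absurd (by decide) hd
        | (cases h <;> rfl)
    · rw [pvB_nofind m hw, if_neg hd]
      refine (pvA_none m hw h).trans ?_
      rfl

-- ===== VERDICT (by name: the statement is the Claim_ definition above) =====
theorem parse_month_spec : Claim_equal_parse_month := by
  intro month human _
  unfold Spec_parse_month parse_month parse_month_alt
  exact pvCore_eq (PySem.Str.lower month) human
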